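-- pv_equiv track=rewrite | github.com/gotwit/Python | DS/Basic/Prog-Fibonacci-Nth-MultipleNumber.py | findFibPos
-- ===== SOURCE A (Python) =====
-- def findFibPos(k, n):
--     arr = [0, 1]
--
--     f1 = arr[0]
--     f2 = arr[1]
--     i, count = 2, 0
--
--     while i != 0:
--         f3 = f1 + f2
--         f1 = f2
--         f2 = f3
--         arr.append(f2)
--
--         if arr[i] % k == 0:
--             count += 1
--
--         if count == n:
--             return i
--         """ if i == 11:
--             break """
--         i += 1
--     # return arr
--     return 0
-- ===== SOURCE B (Python) =====
-- def findFibPos(k, n):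
--     # rank of apparition: the smallest i >= 1 with k | F(i); the indices i >= 2
--     # with k | F(i) are exactly the positive multiples of that rank (for |k| >= 2),
--     # so the nth one is n * rank; for |k| == 1 every index counts, giving n + 1.
--     m = abs(k)
--     if m == 1:
--         return n + 1
--     a, b, i = 1, 1, 2          # a = F(i-1) % m, b = F(i) % m
--     while b != 0:
--         a, b = b, (a + b) % m
--         i += 1
--     return n * i
-- ===== Notes on version B (the rewrite author's own statement) =====
-- stated objective: faster
-- what changed: B replaces A's unbounded bigint Fibonacci scan counting the n divisible entries one by one with the rank-of-apparition closed form: it finds the first index i with F(i) % |k| == 0 using O(1)-size modular arithmetic and returns n*i (n+1 for |k|=1).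
-- outside the precondition, e.g. on findFibPos(5, 0): A returns 2, B returns 0
import Mathlib
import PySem

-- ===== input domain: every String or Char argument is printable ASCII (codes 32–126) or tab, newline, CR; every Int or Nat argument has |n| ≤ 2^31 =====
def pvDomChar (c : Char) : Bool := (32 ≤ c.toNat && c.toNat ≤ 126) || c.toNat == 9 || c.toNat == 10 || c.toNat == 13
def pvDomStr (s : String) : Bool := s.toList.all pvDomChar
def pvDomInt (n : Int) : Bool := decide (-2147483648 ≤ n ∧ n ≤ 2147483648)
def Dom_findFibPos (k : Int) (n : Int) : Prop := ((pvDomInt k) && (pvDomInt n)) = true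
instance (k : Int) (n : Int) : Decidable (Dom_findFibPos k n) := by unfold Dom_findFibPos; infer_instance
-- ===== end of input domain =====

-- B replaces A's unbounded bigint Fibonacci scan with the rank-of-apparition closed form
-- (find the first index with F(i) % |k| == 0 by modular arithmetic, return n * that index;
-- n + 1 for |k| = 1): a genuinely faster algorithm, proved to return A's exact value on Pre_.


-- ===== PORT A =====
-- A's `while i != 0` loop, transliterated with a fuel counter; the fuel is provably
-- sufficient on Pre_ (the loop returns before it runs out), and fuel exhaustion lands on
-- A's trailing unreachable `return 0`.
def fibLoopA (k n : Int) : Nat → List Int → Int → Int → Int → Int → Int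
  | 0, _, _, _, _, _ => 0
  | fuel+1, arr, f1, f2, i, count =>
    if i ≠ 0 then
      let f3 := f1 + f2
      let f1 := f2
      let f2 := f3
      let arr := arr ++ [f2]
      let count := if PySem.Int.mod (PySem.List.pyGetD arr i 0) k = 0 then count + 1 else count
      if count = n then i
      else fibLoopA k n fuel arr f1 f2 (i + 1) count
    else 0

def findFibPos (k : Int) (n : Int) : Int :=
  fibLoopA k n (n.toNat * (k.natAbs * k.natAbs + 1) + 1) [0, 1] 0 1 2 0

-- ===== PORT B =====
-- B's loop finding the first index i ≥ 2 with F(i) ≡ 0 (mod m); state kept reduced mod m.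
-- Fuel m*m+1 provably suffices (the rank of apparition is at most m²).
def fibLoopB (m : Int) : Nat → Int → Int → Int → Int
  | 0, _, _, i => i
  | fuel+1, a, b, i =>
    if b ≠ 0 then fibLoopB m fuel b (PySem.Int.mod (a + b) m) (i + 1)
    else i

def findFibPos_alt (k : Int) (n : Int) : Int :=
  let m := |k|
  if m = 1 then n + 1
  else n * fibLoopB m (m.natAbs * m.natAbs + 1) 1 1 2

-- ===== PRECONDITION & SPEC =====
-- Pre_ excludes k = 0, on which A raises ZeroDivisionError, and n ≤ 0, a meaningless
-- request (the "nth" multiple for n ≤ 0) on which A diverges except that for n = 0 and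
-- |k| ≥ 2 it returns an accidental 2 (its count==n check fires before any multiple is seen).
def Pre_findFibPos (k : Int) (n : Int) : Prop := k ≠ 0 ∧ 1 ≤ n
instance (k : Int) (n : Int) : Decidable (Pre_findFibPos k n) := by unfold Pre_findFibPos; infer_instance
def pvWitness_findFibPos : Int × Int := (4, 2)

def Spec_findFibPos (k : Int) (n : Int) (out : Int) : Prop := out = findFibPos_alt k n
instance (k : Int) (n : Int) (out : Int) : Decidable (Spec_findFibPos k n out) := by unfold Spec_findFibPos; infer_instance

-- ===== CLAIM (what is proved, stated in full; the proofs are below) =====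
def Claim_equal_findFibPos : Prop := ∀ (k : Int) (n : Int), Dom_findFibPos k n → Pre_findFibPos k n → Spec_findFibPos k n (findFibPos k n)

-- ===== LEMMAS AND PROOFS =====

-- the pair (F i, F (i+1)) in ZMod m
def fibPairZ (m : ℕ) (i : ℕ) : ZMod m × ZMod m := ((Nat.fib i : ZMod m), (Nat.fib (i+1) : ZMod m))

theorem fibPairZ_back (m : ℕ) : ∀ (i d : ℕ), fibPairZ m i = fibPairZ m (i + d) → fibPairZ m 0 = fibPairZ m d := by
  intro i
  induction i with
  | zero => intro d h; simpa using h
  | succ j ih =>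
    intro d h
    apply ih
    have h1 : (Nat.fib (j+1) : ZMod m) = (Nat.fib (j+1+d) : ZMod m) := congrArg Prod.fst h
    have h2 : (Nat.fib (j+2) : ZMod m) = (Nat.fib (j+2+d) : ZMod m) := by
      have := congrArg Prod.snd h
      simpa [fibPairZ, Nat.add_right_comm] using this
    have h0 : (Nat.fib j : ZMod m) = (Nat.fib (j+d) : ZMod m) := by
      have e1 : (Nat.fib (j+2) : ZMod m) = (Nat.fib j : ZMod m) + (Nat.fib (j+1) : ZMod m) := by
        rw [Nat.fib_add_two]; push_cast; ring
      have e2 : (Nat.fib (j+2+d) : ZMod m) = (Nat.fib (j+d) : ZMod m) + (Nat.fib (j+1+d) : ZMod m) := by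
        have : j + 2 + d = (j + d) + 2 := by omega
        rw [this, Nat.fib_add_two]
        have : j + d + 1 = j + 1 + d := by omega
        rw [this]; push_cast; ring
      have := h2
      rw [e1, e2, h1] at this
      exact add_right_cancel this
    simp only [fibPairZ, Prod.mk.injEq] at h1 h0 ⊢
    exact ⟨h0, by simpa [Nat.add_right_comm] using h1⟩

theorem exists_fib_rank_le (m : ℕ) (hm : 0 < m) : ∃ j, 0 < j ∧ j ≤ m * m ∧ m ∣ Nat.fib j := by
  haveI : NeZero m := ⟨hm.ne'⟩
  have hcard : (Finset.univ : Finset (ZMod m × ZMod m)).card < (Finset.range (m*m+1)).card := by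
    simp [ZMod.card]
  obtain ⟨i, hi, j, hj, hne, heq⟩ :=
    Finset.exists_ne_map_eq_of_card_lt_of_maps_to (f := fibPairZ m) hcard
      (fun x _ => Finset.mem_univ (fibPairZ m x))
  rw [Finset.mem_range] at hi hj
  -- wlog i < j
  rcases Nat.lt_or_ge i j with hlt | hge
  · have h0 : fibPairZ m 0 = fibPairZ m (j - i) := fibPairZ_back m i (j - i) (by rw [Nat.add_sub_cancel' hlt.le]; exact heq)
    refine ⟨j - i, by omega, by omega, ?_⟩
    have : ((Nat.fib (j - i) : ℕ) : ZMod m) = 0 := by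
      have := congrArg Prod.fst h0
      simpa [fibPairZ] using this.symm
    exact (ZMod.natCast_eq_zero_iff _ _).mp this
  · have hlt : j < i := by omega
    have h0 : fibPairZ m 0 = fibPairZ m (i - j) := fibPairZ_back m j (i - j) (by rw [Nat.add_sub_cancel' hlt.le]; exact heq.symm)
    refine ⟨i - j, by omega, by omega, ?_⟩
    have : ((Nat.fib (i - j) : ℕ) : ZMod m) = 0 := by
      have := congrArg Prod.fst h0
      simpa [fibPairZ] using this.symm
    exact (ZMod.natCast_eq_zero_iff _ _).mp this

theorem exists_fib_rank (m : ℕ) (hm : 0 < m) : ∃ j, 0 < j ∧ m ∣ Nat.fib j := by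
  obtain ⟨j, h1, _, h3⟩ := exists_fib_rank_le m hm
  exact ⟨j, h1, h3⟩

-- rank of apparition of m
def fibRank (m : ℕ) : ℕ :=
  if hm : 0 < m then Nat.find (p := fun j => 0 < j ∧ m ∣ Nat.fib j) (exists_fib_rank m hm) else 0

theorem fibRank_spec (m : ℕ) (hm : 0 < m) : 0 < fibRank m ∧ m ∣ Nat.fib (fibRank m) := by
  rw [fibRank, dif_pos hm]; exact Nat.find_spec (p := fun j => 0 < j ∧ m ∣ Nat.fib j) (exists_fib_rank m hm)

theorem fibRank_min (m : ℕ) (hm : 0 < m) {j : ℕ} (hj : 0 < j) (hlt : j < fibRank m) : ¬ m ∣ Nat.fib j := by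
  rw [fibRank, dif_pos hm] at hlt
  have := Nat.find_min (p := fun j => 0 < j ∧ m ∣ Nat.fib j) (exists_fib_rank m hm) hlt
  tauto

theorem fibRank_le_sq (m : ℕ) (hm : 0 < m) : fibRank m ≤ m * m := by
  obtain ⟨j, h1, h2, h3⟩ := exists_fib_rank_le m hm
  rw [fibRank, dif_pos hm]
  exact le_trans (Nat.find_min' (p := fun j => 0 < j ∧ m ∣ Nat.fib j) (exists_fib_rank m hm) ⟨h1, h3⟩) h2

theorem fibRank_dvd_iff (m : ℕ) (hm : 0 < m) (j : ℕ) : m ∣ Nat.fib j ↔ fibRank m ∣ j := by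
  obtain ⟨hpos, hdvd⟩ := fibRank_spec m hm
  constructor
  · intro h
    rcases Nat.eq_zero_or_pos j with rfl | hj
    · exact dvd_zero _
    have hg : m ∣ Nat.fib (Nat.gcd (fibRank m) j) := by
      rw [Nat.fib_gcd]; exact Nat.dvd_gcd hdvd h
    have hgpos : 0 < Nat.gcd (fibRank m) j := Nat.gcd_pos_of_pos_left _ hpos
    have hgle : Nat.gcd (fibRank m) j ≤ fibRank m := Nat.le_of_dvd hpos (Nat.gcd_dvd_left _ _)
    have : ¬ Nat.gcd (fibRank m) j < fibRank m := fun hl => fibRank_min m hm hgpos hl hg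
    have hge : Nat.gcd (fibRank m) j = fibRank m := by omega
    rw [← hge]; exact Nat.gcd_dvd_right _ _
  · intro h
    exact dvd_trans hdvd (Nat.fib_dvd _ _ h)

theorem fibRank_ge_three (m : ℕ) (hm : 2 ≤ m) : 3 ≤ fibRank m := by
  obtain ⟨hpos, hdvd⟩ := fibRank_spec m (by omega)
  by_contra h
  interval_cases hr : fibRank m <;> simp at hdvd <;> omega

-- B's loop computes the rank
theorem loopB_eq (M : ℕ) (hM : 2 ≤ M) : ∀ (fuel i : ℕ), 2 ≤ i → i ≤ fibRank M → fibRank M ≤ fuel + i →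
    fibLoopB (M : Int) fuel ((Nat.fib (i-1) % M : ℕ) : Int) ((Nat.fib i % M : ℕ) : Int) (i : Int) = (fibRank M : Int) := by
  intro fuel
  induction fuel with
  | zero =>
    intro i h2 hle hfe
    have : i = fibRank M := by omega
    simp [fibLoopB, this]
  | succ f ih =>
    intro i h2 hle hfe
    by_cases hb : ((Nat.fib i % M : ℕ) : Int) = 0
    · have hdvd : M ∣ Nat.fib i := Nat.dvd_of_mod_eq_zero (by exact_mod_cast hb)
      have hd := (fibRank_dvd_iff M (by omega) i).mp hdvd
      have hieq : i = fibRank M := le_antisymm hle (Nat.le_of_dvd (by omega) hd)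
      simp only [fibLoopB]
      rw [if_neg (by simp [hb])]
      exact_mod_cast congrArg (fun t : ℕ => (t : Int)) hieq
    · have hndvd : ¬ M ∣ Nat.fib i := fun h => hb (by
        have := Nat.mod_eq_zero_of_dvd h
        exact_mod_cast this)
      have hir : i ≠ fibRank M := fun h => hndvd (h ▸ (fibRank_spec M (by omega)).2)
      have hmod : PySem.Int.mod (((Nat.fib (i-1) % M : ℕ) : Int) + ((Nat.fib i % M : ℕ) : Int)) (M : Int)
          = ((Nat.fib (i+1) % M : ℕ) : Int) := by
        rw [PySem.Int.mod_eq_emod_of_pos (by exact_mod_cast (by omega : (0:ℕ) < M) : (0:Int) < (M:Int))]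
        have hnat : (Nat.fib (i-1) % M + Nat.fib i % M) % M = Nat.fib (i+1) % M := by
          rw [← Nat.add_mod]
          congr 1
          have h21 : i - 1 + 2 = i + 1 := by omega
          have h11 : i - 1 + 1 = i := by omega
          have := Nat.fib_add_two (n := i - 1)
          rw [h21, h11] at this
          omega
        exact_mod_cast hnat
      have hrec := ih (i+1) (by omega) (by omega) (by omega)
      simp only [fibLoopB, if_pos hb, hmod]
      rw [show ((i:Int) + 1) = (((i+1 : ℕ)) : Int) by push_cast; ring]
      rw [show ((i + 1) - 1) = i from by omega] at hrec
      exact hrec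

-- arr[i] after the append is the appended element
theorem pyGetD_concat (arr : List Int) (x : Int) (i : ℕ) (h : arr.length = i) :
    PySem.List.pyGetD (arr ++ [x]) ((i : ℕ) : Int) 0 = x := by
  subst h
  rw [PySem.List.pyGetD_natCast]
  simp [List.getD]

-- f1 + f2 is the next Fibonacci number
theorem fib_step (i : ℕ) (h2 : 2 ≤ i) : (Nat.fib (i-2) : Int) + (Nat.fib (i-1) : Int) = (Nat.fib i : Int) := by
  have h := Nat.fib_add_two (n := i-2)
  rw [show i-2+2 = i from by omega, show i-2+1 = i-1 from by omega] at h
  exact_mod_cast h.symm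

-- A's loop, |k| ≥ 2 case
theorem loopA_eq (k n : Int) (M : ℕ) (hM : 2 ≤ M) (hk : k.natAbs = M) (N : ℕ) (hn : n = (N : Int)) :
    ∀ (fuel i c : ℕ) (arr : List Int), 2 ≤ i → c < N → c * fibRank M < i → i ≤ (c+1) * fibRank M →
      arr.length = i → N * fibRank M + 1 ≤ fuel + i →
      fibLoopA k n fuel arr (Nat.fib (i-2) : Int) (Nat.fib (i-1) : Int) (i : Int) (c : Int) = ((N * fibRank M : ℕ) : Int) := by
  have hα3 : 3 ≤ fibRank M := fibRank_ge_three M hM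
  intro fuel
  induction fuel with
  | zero =>
    intro i c arr h2 hcN hlo hhi hlen hfe
    have : (c+1) * fibRank M ≤ N * fibRank M := Nat.mul_le_mul_right _ (by omega)
    exact absurd hfe (by omega)
  | succ f ih =>
    intro i c arr h2 hcN hlo hhi hlen hfe
    have hne : ((i : ℕ) : Int) ≠ 0 := by exact_mod_cast (by omega : (i : ℕ) ≠ 0)
    simp only [fibLoopA]
    rw [if_pos hne, fib_step i h2, pyGetD_concat arr _ i hlen]
    have hMk : ((M : ℕ) : Int) ∣ (Nat.fib i : Int) ↔ k ∣ (Nat.fib i : Int) := by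
      rw [← hk]; exact Int.natAbs_dvd
    have hdvd_iff : PySem.Int.mod (Nat.fib i : Int) k = 0 ↔ fibRank M ∣ i := by
      rw [PySem.Int.mod_eq_zero_iff_dvd, ← hMk, Int.natCast_dvd_natCast,
        fibRank_dvd_iff M (by omega)]
    by_cases hdiv : fibRank M ∣ i
    · have hieq : i = (c+1) * fibRank M := by
        obtain ⟨t, rfl⟩ := hdiv
        have hpos : 0 < fibRank M := by omega
        have h1 : c < t := by
          by_contra hcon
          have hcon' : t ≤ c := by omega
          have := Nat.mul_le_mul_left (fibRank M) hcon'
          have : fibRank M * t ≤ c * fibRank M := by rw [Nat.mul_comm c]; exact this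
          omega
        have h2' : t ≤ c + 1 := by
          by_contra hcon
          have hcon' : c + 2 ≤ t := by omega
          have hmle : fibRank M * (c + 2) ≤ fibRank M * t := Nat.mul_le_mul_left _ hcon'
          have hexp : fibRank M * (c + 2) = (c+1) * fibRank M + fibRank M := by ring
          omega
        have : t = c + 1 := by omega
        rw [this, Nat.mul_comm]
      rw [if_pos (hdvd_iff.mpr hdiv)]
      by_cases hcend : c + 1 = N
      · rw [if_pos (by rw [hn]; exact_mod_cast hcend)]
        rw [hieq, hcend]
      · rw [if_neg (by rw [hn]; intro hc; exact hcend (by exact_mod_cast hc))]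
        have hexp : (c+1+1) * fibRank M = (c+1) * fibRank M + fibRank M := by ring
        have hnext : i + 1 ≤ (c+1+1) * fibRank M := by omega
        have hlo' : (c+1) * fibRank M < i + 1 := by omega
        have H := ih (i+1) (c+1) (arr ++ [(Nat.fib i : Int)]) (by omega) (by omega)
          hlo' hnext (by simp [hlen]) (by omega)
        rw [show i+1-2 = i-1 from by omega, show i+1-1 = i from by omega] at H
        push_cast at H ⊢
        exact H
    · rw [if_neg (fun h => hdiv (hdvd_iff.mp h))]
      rw [if_neg (by rw [hn]; intro hc; exact absurd (by exact_mod_cast hc : c = N) (by omega))]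
      have hlt : i < (c+1) * fibRank M := by
        rcases Nat.lt_or_ge i ((c+1) * fibRank M) with h | h
        · exact h
        · have hieq : i = (c+1) * fibRank M := by omega
          exact absurd (hieq ▸ dvd_mul_left (fibRank M) (c+1)) hdiv
      have H := ih (i+1) c (arr ++ [(Nat.fib i : Int)]) (by omega) hcN (by omega)
        (by omega) (by simp [hlen]) (by omega)
      rw [show i+1-2 = i-1 from by omega, show i+1-1 = i from by omega] at H
      push_cast at H ⊢
      exact H

-- A's loop, |k| = 1 case: every entry counts
theorem loopA_one (k n : Int) (hk : k.natAbs = 1) (N : ℕ) (hn : n = (N : Int)) :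
    ∀ (fuel i : ℕ) (arr : List Int), 2 ≤ i → i ≤ N + 1 → arr.length = i → N + 2 ≤ fuel + i →
      fibLoopA k n fuel arr (Nat.fib (i-2) : Int) (Nat.fib (i-1) : Int) (i : Int) ((i : Int) - 2) = ((N : ℕ) : Int) + 1 := by
  intro fuel
  induction fuel with
  | zero => intro i arr h2 hle hlen hfe; exact absurd hfe (by omega)
  | succ f ih =>
    intro i arr h2 hle hlen hfe
    have hne : ((i : ℕ) : Int) ≠ 0 := by exact_mod_cast (by omega : (i : ℕ) ≠ 0)
    simp only [fibLoopA]
    rw [if_pos hne, fib_step i h2, pyGetD_concat arr _ i hlen]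
    have hdvd : PySem.Int.mod (Nat.fib i : Int) k = 0 := by
      rw [PySem.Int.mod_eq_zero_iff_dvd]
      rcases Int.natAbs_eq k with h | h
      · rw [h, hk]; exact one_dvd _
      · rw [h, hk]; exact (neg_dvd).mpr (one_dvd _)
    rw [if_pos hdvd]
    by_cases hend : i = N + 1
    · rw [if_pos (by subst hend; rw [hn]; push_cast; ring)]
      subst hend; push_cast; ring
    · rw [if_neg (by rw [hn]; intro hc; apply hend; exact_mod_cast (by linarith : ((i : ℕ) : Int) = ((N : ℕ) : Int) + 1))]
      have H := ih (i+1) (arr ++ [(Nat.fib i : Int)]) (by omega) (by omega) (by simp [hlen]) (by omega)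
      rw [show i+1-2 = i-1 from by omega, show i+1-1 = i from by omega] at H
      push_cast at H ⊢
      convert H using 2
      ring

-- ===== VERDICT (by name: the statement is the Claim_ definition above) =====
theorem findFibPos_spec : Claim_equal_findFibPos := by
  unfold Claim_equal_findFibPos
  intro k n _ hpre
  obtain ⟨hk0, hn1⟩ := hpre
  have hMpos : 0 < k.natAbs := Int.natAbs_pos.mpr hk0
  have hn : n = ((n.toNat : ℕ) : Int) := (Int.toNat_of_nonneg (by omega)).symm
  have hN1 : 1 ≤ n.toNat := by omega
  unfold Spec_findFibPos
  by_cases hM1 : k.natAbs = 1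
  · have habs : |k| = 1 := by rw [Int.abs_eq_natAbs, hM1]; rfl
    have hB : findFibPos_alt k n = n + 1 := by
      simp only [findFibPos_alt]
      rw [if_pos habs]
    have hA : findFibPos k n = n + 1 := by
      unfold findFibPos
      have H := loopA_one k n hM1 n.toNat hn (n.toNat * (k.natAbs * k.natAbs + 1) + 1) 2 [0, 1]
        (by omega) (by omega) (by simp) (by rw [hM1]; omega)
      norm_num at H
      rw [H]
      omega
    rw [hA, hB]
  · have hM2 : 2 ≤ k.natAbs := by omega
    have hα3 : 3 ≤ fibRank k.natAbs := fibRank_ge_three _ hM2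
    have hαsq : fibRank k.natAbs ≤ k.natAbs * k.natAbs := fibRank_le_sq _ (by omega)
    have habs : |k| = ((k.natAbs : ℕ) : Int) := Int.abs_eq_natAbs k
    have habsne : ¬ |k| = 1 := by rw [habs]; exact_mod_cast hM1
    have hB : findFibPos_alt k n = n * ((fibRank k.natAbs : ℕ) : Int) := by
      simp only [findFibPos_alt]
      rw [if_neg habsne, habs]
      simp only [Int.natAbs_natCast]
      congr 1
      have H := loopB_eq k.natAbs hM2 (k.natAbs * k.natAbs + 1) 2
        (by omega) (by omega) (by omega)
      simp only [show (2:ℕ)-1 = 1 from rfl, Nat.fib_one, Nat.fib_two,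
        Nat.mod_eq_of_lt (show 1 < k.natAbs by omega)] at H
      exact_mod_cast H
    have hA : findFibPos k n = ((n.toNat * fibRank k.natAbs : ℕ) : Int) := by
      unfold findFibPos
      have hmle := Nat.mul_le_mul_left n.toNat hαsq
      have hexp : n.toNat * (k.natAbs * k.natAbs + 1) = n.toNat * (k.natAbs * k.natAbs) + n.toNat := by
        ring
      have H := loopA_eq k n k.natAbs hM2 rfl n.toNat hn
        (n.toNat * (k.natAbs * k.natAbs + 1) + 1) 2 0 [0, 1]
        (by omega) (by omega) (by omega) (by omega) (by simp) (by omega)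
      simp only [show (2:ℕ)-2 = 0 from rfl, show (2:ℕ)-1 = 1 from rfl,
        Nat.fib_zero, Nat.fib_one] at H
      exact_mod_cast H
    rw [hA, hB]
    push_cast
    rw [← hn]
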